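-- pv_equiv track=rewrite | github.com/vtsitotas/Crypto_Projects | project_1/κώδικες/2.6.py | text_to_bits
-- ===== SOURCE A (Python) =====
-- char_to_bits = {
--     'A': '00000', 'B': '00001', 'C': '00010', 'D': '00011', 'E': '00100',
--     'F': '00101', 'G': '00110', 'H': '00111', 'I': '01000', 'J': '01001',
--     'K': '01010', 'L': '01011', 'M': '01100', 'N': '01101', 'O': '01110',
--     'P': '01111', 'Q': '10000', 'R': '10001', 'S': '10010', 'T': '10011',
--     'U': '10100', 'V': '10101', 'W': '10110', 'X': '10111', 'Y': '11000',
--     'Z': '11001', '.': '11010', '!': '11011', '?': '11100', '(': '11101',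
--     ')': '11110', '-': '11111'
-- }
--
-- def text_to_bits(text):
--     """Μετατρέπει κείμενο σε συμβολοσειρά bits χρησιμοποιώντας τον πίνακα κωδικοποίησης"""
--     bits = []
--     for char in text.upper():  # μετατροπή σε κεφαλαία
--         if char in char_to_bits:
--             bits.append(char_to_bits[char])  # προσθήκη δυαδικής μορφής
--         else:
--             raise ValueError(f"Character '{char}' not in encoding table")  # έλεγχος έγκυρων χαρακτήρων
--     return ''.join(bits)  # ένωση όλων των bits σε μία συμβολοσειρά
-- ===== SOURCE B (Python) =====
-- ALPHA = 'ABCDEFGHIJKLMNOPQRSTUVWXYZ.!?()-'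
-- INDEX = {c: i for i, c in enumerate(ALPHA)}
--
-- def _value(up, lo, hi):
--     # base-32 value of up[lo:hi], divide and conquer
--     if hi - lo == 1:
--         i = INDEX.get(up[lo])
--         if i is None:
--             raise ValueError(f"Character '{up[lo]}' not in encoding table")
--         return i
--     mid = (lo + hi) // 2
--     return _value(up, lo, mid) * 32 ** (hi - mid) + _value(up, mid, hi)
--
-- def text_to_bits(text):
--     up = text.upper()
--     if not up:
--         return ''
--     return format(_value(up, 0, len(up)), '0{}b'.format(5 * len(up)))
-- ===== Notes on version B (the rewrite author's own statement) =====
-- stated objective: alternative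
-- what changed: B encodes the whole text as one big base-32 integer computed by divide-and-conquer over the string (value of a slice = value of left half times 32^len(right half) plus value of right half, with the character's rank in the ordering string ALPHA at the leaves) and produces the bitstring in a single final zero-padded binary formatting step of width 5*len, instead of A's left-to-right per-character table lookup with list-append and join.
import Mathlib
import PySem

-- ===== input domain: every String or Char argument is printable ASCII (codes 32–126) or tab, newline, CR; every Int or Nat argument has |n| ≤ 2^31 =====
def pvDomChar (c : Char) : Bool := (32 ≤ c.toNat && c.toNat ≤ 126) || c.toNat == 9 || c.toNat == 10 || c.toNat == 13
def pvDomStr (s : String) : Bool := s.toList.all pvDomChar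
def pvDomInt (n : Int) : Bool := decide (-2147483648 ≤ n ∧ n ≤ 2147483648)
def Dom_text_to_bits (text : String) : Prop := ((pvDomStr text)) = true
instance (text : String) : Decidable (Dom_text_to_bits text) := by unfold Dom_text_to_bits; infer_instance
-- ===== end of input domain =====

set_option maxRecDepth 10000


-- B encodes the whole text as ONE big base-32 integer, built by divide-and-conquer over the
-- string (rank in ALPHA at the leaves), and emits the bitstring in one final formatting
-- step, instead of A's per-character table lookup appended code by code (alternative).

-- ===== PORT A =====
-- the char_to_bits dict, in insertion order
def charToBits : PySem.Dict Char String :=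
  PySem.Dict.ofList [('A', "00000"), ('B', "00001"), ('C', "00010"), ('D', "00011"), ('E', "00100"),
   ('F', "00101"), ('G', "00110"), ('H', "00111"), ('I', "01000"), ('J', "01001"),
   ('K', "01010"), ('L', "01011"), ('M', "01100"), ('N', "01101"), ('O', "01110"),
   ('P', "01111"), ('Q', "10000"), ('R', "10001"), ('S', "10010"), ('T', "10011"),
   ('U', "10100"), ('V', "10101"), ('W', "10110"), ('X', "10111"), ('Y', "11000"),
   ('Z', "11001"), ('.', "11010"), ('!', "11011"), ('?', "11100"), ('(', "11101"),
   (')', "11110"), ('-', "11111")]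

-- loop body of A: append the table entry if present; the else-branch raises in Python
-- (excluded by Pre_), ported as returning the accumulator unchanged
def stepA (acc : List String) (c : Char) : List String :=
  if (PySem.Dict.get? charToBits c).isSome then acc ++ [PySem.Dict.getD charToBits c ""] else acc

def text_to_bits (text : String) : String :=
  PySem.Str.join "" ((PySem.Str.upper text).toList.foldl stepA [])   -- ''.join(bits), exact

-- ===== PORT B =====
def ALPHA : String := "ABCDEFGHIJKLMNOPQRSTUVWXYZ.!?()-"

-- INDEX = {c: i for i, c in enumerate(ALPHA)}
def INDEX : PySem.Dict Char Int :=
  PySem.Dict.ofList ((PySem.List.enumerate ALPHA.toList).map (fun p => (p.2, p.1)))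

-- _value(up, lo, hi): base-32 value of the slice, divide and conquer; the slice up[lo:hi]
-- is represented by the sublist itself (mid = (lo+hi)//2 splits it at length/2).
-- INDEX.get miss raises in Python (excluded by Pre_), ported as 0; the [] branch is an
-- unreachable totality guard (Python never recurses into an empty slice).
def dcval : List Char → Int
  | [] => 0
  | [c] =>
      match PySem.Dict.get? INDEX c with
      | none => 0
      | some i => i
  | c0 :: c1 :: cs =>
      let full := c0 :: c1 :: cs
      let mid := full.length / 2
      dcval (full.take mid) * 32 ^ (full.drop mid).length + dcval (full.drop mid)
termination_by cs => cs.length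
decreasing_by
  all_goals simp only [List.length_take, List.length_drop, List.length_cons]; omega

def text_to_bits_alt (text : String) : String :=
  let up := PySem.Str.upper text
  -- format(value, '0{5*len(up)}b') if up else '': for value ≥ 0 this zero-padded binary
  -- formatting is exactly zfill of format(value,'b'); exact here since value ≥ 0
  if up.toList = [] then "" else PySem.Str.zfill (PySem.Int.toBin (dcval up.toList)) (5 * PySem.Str.len up)

-- ===== PRECONDITION & SPEC =====
-- Pre_ excludes exactly the inputs on which A raises ValueError: some character of
-- text.upper() is outside the 32-symbol encoding alphabet.
def Pre_text_to_bits (text : String) : Prop :=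
  ((PySem.Str.upper text).toList.all (fun c => ALPHA.toList.contains c)) = true
instance (text : String) : Decidable (Pre_text_to_bits text) := by unfold Pre_text_to_bits; infer_instance
def pvWitness_text_to_bits : String := "HI!"

def Spec_text_to_bits (text : String) (out : String) : Prop := out = text_to_bits_alt text
instance (text : String) (out : String) : Decidable (Spec_text_to_bits text out) := by unfold Spec_text_to_bits; infer_instance

-- ===== CLAIM (what is proved, stated in full; the proofs are below) =====
def Claim_equal_text_to_bits : Prop := ∀ (text : String), Dom_text_to_bits text → Pre_text_to_bits text → Spec_text_to_bits text (text_to_bits text)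

-- ===== LEMMAS AND PROOFS =====

-- rank of a character in ALPHA (proof-side notion)
def idxN (c : Char) : ℕ := List.idxOf c ALPHA.toList

-- A's code for a character (proof-side)
def codeA (c : Char) : String := PySem.Dict.getD charToBits c ""

-- B's numeric step on naturals (proof-side)
def natstep (v : ℕ) (c : Char) : ℕ := v * 32 + idxN c

-- the w-digit (zero-padded, MSB first) binary representation of n
def padBin : ℕ → ℕ → List Char
  | 0, _ => []
  | (k+1), n => padBin k (n / 2) ++ [Nat.digitChar (n % 2)]

lemma padBin_zero : ∀ k, padBin k 0 = List.replicate k '0' := by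
  intro k
  induction k with
  | zero => rfl
  | succ k ih =>
      show padBin k 0 ++ [Nat.digitChar 0] = _
      rw [ih]
      simp [List.replicate_succ' (n := k)]
      rfl

lemma padBin_split : ∀ (b a m r : ℕ), r < 2 ^ b →
    padBin (a + b) (m * 2 ^ b + r) = padBin a m ++ padBin b r := by
  intro b
  induction b with
  | zero =>
      intro a m r hr
      interval_cases r
      simp [padBin]
  | succ b ih =>
      intro a m r hr
      have hpow : m * 2 ^ (b + 1) = 2 * (m * 2 ^ b) := by ring
      have hpow2 : 2 ^ (b + 1) = 2 * 2 ^ b := by ring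
      have h1 : (m * 2 ^ (b + 1) + r) / 2 = m * 2 ^ b + r / 2 := by omega
      have h2 : (m * 2 ^ (b + 1) + r) % 2 = r % 2 := by omega
      have hr2 : r / 2 < 2 ^ b := by omega
      show padBin (a + b) ((m * 2 ^ (b+1) + r) / 2) ++ [Nat.digitChar ((m * 2 ^ (b+1) + r) % 2)]
          = padBin a m ++ (padBin b (r / 2) ++ [Nat.digitChar (r % 2)])
      rw [h1, h2, ih a m (r / 2) hr2, List.append_assoc]

-- toDigitsCore: the accumulator is appended at the end
lemma tdc_shift : ∀ (f n : ℕ) (acc : List Char),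
    Nat.toDigitsCore 2 f n acc = Nat.toDigitsCore 2 f n [] ++ acc := by
  intro f
  induction f with
  | zero => intro n acc; simp [Nat.toDigitsCore]
  | succ f ih =>
      intro n acc
      simp only [Nat.toDigitsCore]
      by_cases h : n / 2 = 0
      · simp [h]
      · simp only [h, if_false]
        rw [ih (n / 2) ((n % 2).digitChar :: acc), ih (n / 2) [(n % 2).digitChar]]
        simp

-- toDigitsCore: fuel does not matter once it exceeds n
lemma tdc_fuel : ∀ (f₁ f₂ n : ℕ) (acc : List Char), n < f₁ → n < f₂ →
    Nat.toDigitsCore 2 f₁ n acc = Nat.toDigitsCore 2 f₂ n acc := by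
  intro f₁
  induction f₁ with
  | zero => intro f₂ n acc h1 _; omega
  | succ f₁ ih =>
      intro f₂ n acc h1 h2
      cases f₂ with
      | zero => omega
      | succ f₂ =>
          simp only [Nat.toDigitsCore]
          by_cases h : n / 2 = 0
          · simp [h]
          · simp only [h, if_false]
            exact ih f₂ (n / 2) _ (by omega) (by omega)

lemma toDigits_small (n : ℕ) (h : n < 2) : Nat.toDigits 2 n = [Nat.digitChar n] := by
  interval_cases n <;> rfl

lemma toDigits_step (n : ℕ) (h : 2 ≤ n) :
    Nat.toDigits 2 n = Nat.toDigits 2 (n / 2) ++ [Nat.digitChar (n % 2)] := by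
  show Nat.toDigitsCore 2 (n + 1) n [] = _
  have hne : ¬ n / 2 = 0 := by omega
  simp only [Nat.toDigitsCore, hne, if_false]
  rw [tdc_fuel n (n / 2 + 1) (n / 2) _ (by omega) (by omega)]
  show Nat.toDigitsCore 2 (n/2 + 1) (n/2) [(n % 2).digitChar] = _
  rw [tdc_shift]
  rfl

-- every character toDigitsCore 2 produces is '0' or '1'
lemma tdc_digits : ∀ (f n : ℕ) (acc : List Char), (∀ c ∈ acc, c = '0' ∨ c = '1') →
    ∀ c ∈ Nat.toDigitsCore 2 f n acc, c = '0' ∨ c = '1' := by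
  intro f
  induction f with
  | zero => intro n acc hacc; simpa [Nat.toDigitsCore] using hacc
  | succ f ih =>
      intro n acc hacc
      have hd : (n % 2).digitChar = '0' ∨ (n % 2).digitChar = '1' := by
        have : n % 2 = 0 ∨ n % 2 = 1 := by omega
        rcases this with h | h <;> rw [h] <;> simp [Nat.digitChar]
      simp only [Nat.toDigitsCore]
      by_cases h : n / 2 = 0
      · simp only [h, if_true]
        intro c hc
        rcases List.mem_cons.mp hc with h' | h'
        · subst h'; exact hd
        · exact hacc c h'
      · simp only [h, if_false]
        refine ih (n / 2) _ ?_
        intro c hc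
        rcases List.mem_cons.mp hc with h' | h'
        · subst h'; exact hd
        · exact hacc c h'

lemma toDigits_ne_nil (n : ℕ) : Nat.toDigits 2 n ≠ [] := by
  show Nat.toDigitsCore 2 (n + 1) n [] ≠ []
  simp only [Nat.toDigitsCore]
  by_cases h : n / 2 = 0
  · simp [h]
  · simp only [h, if_false]
    rw [tdc_shift]
    simp

-- zero-padding toDigits to width w gives padBin
lemma pad_toDigits : ∀ (w n : ℕ), n < 2 ^ (w + 1) →
    List.replicate ((w + 1) - (Nat.toDigits 2 n).length) '0' ++ Nat.toDigits 2 n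
      = padBin (w + 1) n := by
  intro w
  induction w with
  | zero =>
      intro n hn
      interval_cases n <;> rfl
  | succ w ih =>
      intro n hn
      by_cases h2 : n < 2
      · rw [toDigits_small n h2]
        have hd2 : n / 2 = 0 := by omega
        have hm2 : n % 2 = n := by omega
        show _ = padBin (w + 1) (n / 2) ++ [Nat.digitChar (n % 2)]
        rw [hd2, hm2, padBin_zero]
        simp
      · rw [toDigits_step n (by omega)]
        have hdiv : n / 2 < 2 ^ (w + 1) := by
          have hpow : 2 ^ (w + 2) = 2 * 2 ^ (w + 1) := by ring
          omega
        have hih := ih (n / 2) hdiv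
        have harith : (w + 2) - ((Nat.toDigits 2 (n / 2)).length + 1)
            = (w + 1) - (Nat.toDigits 2 (n / 2)).length := by omega
        show List.replicate ((w + 2) - ((Nat.toDigits 2 (n / 2)) ++ [Nat.digitChar (n % 2)]).length) '0'
              ++ (Nat.toDigits 2 (n / 2) ++ [Nat.digitChar (n % 2)])
            = padBin (w + 1) (n / 2) ++ [Nat.digitChar (n % 2)]
        rw [List.length_append, List.length_singleton, harith, ← List.append_assoc, hih]

-- B's final formatting equals padBin
lemma zfill_toBin (k v : ℕ) (hk : 1 ≤ k) (hv : v < 2 ^ (5 * k)) :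
    PySem.Str.zfill (PySem.Int.toBin (v : ℤ)) (5 * (k : ℤ)) = String.ofList (padBin (5 * k) v) := by
  have hbin : PySem.Int.toBin (v : ℤ) = String.ofList (Nat.toDigits 2 v) := by
    unfold PySem.Int.toBin PySem.Int.toBinChars
    have hv0 : (0 : ℤ) ≤ (v : ℤ) := by positivity
    rw [if_neg (not_lt.mpr hv0), Int.toNat_natCast]
  rw [hbin]
  unfold PySem.Str.zfill
  rw [String.toList_ofList]
  congr 1
  have hlen : (Nat.toDigits 2 v).length ≤ 5 * k :=
    Nat.toDigits_length 2 v (5 * k) (by omega) hv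
  have hw : (5 * (k : ℤ)).toNat = 5 * k := by omega
  have hk5 : ∃ w, 5 * k = w + 1 := ⟨5 * k - 1, by omega⟩
  obtain ⟨w, hw5⟩ := hk5
  have hpad := pad_toDigits w v (by rw [← hw5]; exact hv)
  unfold PySem.Chars.zfill
  by_cases hle : (5 * (k : ℤ)) ≤ ((Nat.toDigits 2 v).length : ℤ)
  · rw [if_pos hle]
    have hlen' : (Nat.toDigits 2 v).length = w + 1 := by omega
    rw [hw5, ← hpad, hlen']
    simp
  · rw [if_neg hle]
    obtain ⟨c, rest, hcr⟩ : ∃ c rest, Nat.toDigits 2 v = c :: rest := by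
      cases h : Nat.toDigits 2 v with
      | nil => exact absurd h (toDigits_ne_nil v)
      | cons c rest => exact ⟨c, rest, rfl⟩
    have hc01 : c = '0' ∨ c = '1' := by
      have := tdc_digits (v + 1) v [] (by simp) c
      apply this
      show c ∈ Nat.toDigits 2 v
      rw [hcr]; exact List.mem_cons_self
    have hcsign : ¬ (c = '+' ∨ c = '-') := by
      rcases hc01 with h | h <;> subst h <;> decide
    rw [hcr]
    show (if c = '+' ∨ c = '-' then _ else _) = _
    rw [if_neg hcsign, ← hcr, hw, hw5]
    exact hpad

-- the 32 per-character facts, checked by kernel evaluation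
lemma keyBool : (ALPHA.toList.all fun c =>
    (PySem.Dict.get? charToBits c).isSome &&
    (PySem.Dict.get? INDEX c == some ((idxN c : ℕ) : ℤ)) &&
    ((codeA c).toList == padBin 5 (idxN c)) &&
    decide (idxN c < 32)) = true := by
  decide

lemma key : ∀ c ∈ ALPHA.toList,
    (PySem.Dict.get? charToBits c).isSome = true ∧
    PySem.Dict.get? INDEX c = some ((idxN c : ℕ) : ℤ) ∧
    (codeA c).toList = padBin 5 (idxN c) ∧
    idxN c < 32 := by
  intro c hc
  have h := List.all_eq_true.mp keyBool c hc
  simp only [Bool.and_eq_true, beq_iff_eq, decide_eq_true_eq] at h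
  exact ⟨h.1.1.1, h.1.1.2, h.1.2, h.2⟩

-- A's fold appends the per-character codes
lemma foldA : ∀ (cs : List Char) (acc : List String), (∀ c ∈ cs, c ∈ ALPHA.toList) →
    List.foldl stepA acc cs = acc ++ cs.map codeA := by
  intro cs
  induction cs with
  | nil => intro acc _; simp
  | cons c cs ih =>
      intro acc hmem
      have hc := (key c (hmem c List.mem_cons_self)).1
      show List.foldl stepA (stepA acc c) cs = _
      rw [ih _ (fun x hx => hmem x (List.mem_cons_of_mem _ hx))]
      unfold stepA codeA
      rw [if_pos hc]
      simp

-- the left fold is affine in its accumulator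
lemma fold_affine : ∀ (ys : List Char) (w : ℕ),
    List.foldl natstep w ys = w * 32 ^ ys.length + List.foldl natstep 0 ys := by
  intro ys
  induction ys with
  | nil => intro w; simp
  | cons c ys ih =>
      intro w
      show List.foldl natstep (natstep w c) ys = _
      rw [ih (natstep w c)]
      conv_rhs => rw [show List.foldl natstep 0 (c :: ys) = List.foldl natstep (natstep 0 c) ys from rfl,
        ih (natstep 0 c)]
      unfold natstep
      simp only [List.length_cons, pow_succ]
      ring

-- folding over a concatenation
lemma fold_append (xs ys : List Char) :
    List.foldl natstep 0 (xs ++ ys)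
      = List.foldl natstep 0 xs * 32 ^ ys.length + List.foldl natstep 0 ys := by
  rw [List.foldl_append, fold_affine ys (List.foldl natstep 0 xs)]

-- B's divide-and-conquer value is the left-to-right base-32 fold, coerced
lemma dcval_eq : ∀ (n : ℕ) (cs : List Char), cs.length = n → cs ≠ [] →
    (∀ c ∈ cs, c ∈ ALPHA.toList) → dcval cs = ((List.foldl natstep 0 cs : ℕ) : ℤ) := by
  intro n
  induction n using Nat.strong_induction_on with
  | _ n ih =>
      intro cs hlen hne hmem
      match cs, hne with
      | [c], _ =>
          have hc := (key c (hmem c List.mem_cons_self)).2.1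
          show dcval [c] = _
          unfold dcval
          rw [hc]
          show ((idxN c : ℕ) : ℤ) = ((natstep 0 c : ℕ) : ℤ)
          unfold natstep
          norm_num
      | c0 :: c1 :: rest, _ =>
          have hfull : (c0 :: c1 :: rest).length = n := hlen
          have hlen2 : 2 ≤ (c0 :: c1 :: rest).length := by simp
          have hdc : dcval (c0 :: c1 :: rest)
              = dcval ((c0 :: c1 :: rest).take ((c0 :: c1 :: rest).length / 2))
                  * 32 ^ ((c0 :: c1 :: rest).drop ((c0 :: c1 :: rest).length / 2)).length
                + dcval ((c0 :: c1 :: rest).drop ((c0 :: c1 :: rest).length / 2)) := by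
            rw [dcval]
          set full := c0 :: c1 :: rest with hfulldef
          set mid := full.length / 2 with hmid
          have hmid1 : 1 ≤ mid := by omega
          have hmidlt : mid < full.length := by omega
          have htk : (full.take mid).length = mid := by
            simp only [List.length_take]; omega
          have hdr : (full.drop mid).length = full.length - mid := by
            simp only [List.length_drop]
          have htkmem : ∀ c ∈ full.take mid, c ∈ ALPHA.toList :=
            fun c hc => hmem c (List.mem_of_mem_take hc)
          have hdrmem : ∀ c ∈ full.drop mid, c ∈ ALPHA.toList :=
            fun c hc => hmem c (List.mem_of_mem_drop hc)
          have htkne : full.take mid ≠ [] := by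
            intro h; have := congrArg List.length h; simp [htk] at this; omega
          have hdrne : full.drop mid ≠ [] := by
            intro h; have := congrArg List.length h; simp [hdr] at this; omega
          have h1 := ih (full.take mid).length (by omega) (full.take mid) rfl htkne htkmem
          have h2 := ih (full.drop mid).length (by omega) (full.drop mid) rfl hdrne hdrmem
          have hcat := fold_append (List.take mid full) (List.drop mid full)
          rw [List.take_append_drop] at hcat
          rw [hdc, h1, h2, hcat]
          push_cast
          ring

-- the concatenated codes are the padded binary form of the accumulated base-32 value
lemma core : ∀ (cs : List Char), (∀ c ∈ cs, c ∈ ALPHA.toList) →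
    List.foldl natstep 0 cs < 2 ^ (5 * cs.length) ∧
    ((cs.map codeA).map String.toList).flatten = padBin (5 * cs.length) (List.foldl natstep 0 cs) := by
  intro cs
  induction cs using List.reverseRecOn with
  | nil => exact fun _ => ⟨by norm_num, rfl⟩
  | append_singleton cs c ih =>
      intro hmem
      have hmem' : ∀ x ∈ cs, x ∈ ALPHA.toList :=
        fun x hx => hmem x (List.mem_append_left _ hx)
      obtain ⟨hlt, hflat⟩ := ih hmem'
      have hkey := key c (hmem c (List.mem_append_right _ List.mem_cons_self))
      have hfold : List.foldl natstep 0 (cs ++ [c])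
          = List.foldl natstep 0 cs * 32 + idxN c := by
        rw [List.foldl_append]; rfl
      constructor
      · rw [hfold, List.length_append, List.length_singleton]
        have h32 : idxN c < 32 := hkey.2.2.2
        have : 2 ^ (5 * (cs.length + 1)) = 2 ^ (5 * cs.length) * 32 := by ring
        rw [this]
        calc List.foldl natstep 0 cs * 32 + idxN c
            < List.foldl natstep 0 cs * 32 + 32 := by omega
          _ ≤ 2 ^ (5 * cs.length) * 32 := by
              have : List.foldl natstep 0 cs + 1 ≤ 2 ^ (5 * cs.length) := hlt
              nlinarith
      · rw [hfold, List.length_append, List.length_singleton]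
        have h5 : 5 * (cs.length + 1) = 5 * cs.length + 5 := by ring
        rw [h5]
        have h32 : (32 : ℕ) = 2 ^ 5 := by norm_num
        have hsplit := padBin_split 5 (5 * cs.length) (List.foldl natstep 0 cs) (idxN c)
          (by have := hkey.2.2.2; omega)
        rw [← h32] at hsplit
        rw [hsplit]
        simp only [List.map_append, List.map_map, List.flatten_append]
        rw [← hflat]
        simp [hkey.2.2.1]

-- ''.join equals flatten on the character level
lemma join_flatten (parts : List String) :
    PySem.Str.join "" parts = String.ofList ((parts.map String.toList).flatten) := by
  unfold PySem.Str.join PySem.Chars.join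
  congr 1
  show List.intercalate [] (parts.map String.toList) = _
  unfold List.intercalate
  generalize parts.map String.toList = l
  induction l with
  | nil => rfl
  | cons x l ih =>
      cases l with
      | nil => simp
      | cons y t => simp_all [List.intersperse]

-- ===== VERDICT (by name: the statement is the Claim_ definition above) =====
theorem text_to_bits_spec : Claim_equal_text_to_bits := by
  intro text _ hpre
  unfold Spec_text_to_bits text_to_bits text_to_bits_alt
  have hmem : ∀ c ∈ (PySem.Str.upper text).toList, c ∈ ALPHA.toList := by
    intro c hc
    have := List.all_eq_true.mp hpre c hc
    simpa using this
  rw [foldA _ [] hmem, List.nil_append, join_flatten]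
  show String.ofList ((((PySem.Str.upper text).toList.map codeA).map String.toList).flatten)
      = if (PySem.Str.upper text).toList = [] then "" else
          PySem.Str.zfill (PySem.Int.toBin (dcval (PySem.Str.upper text).toList))
            (5 * PySem.Str.len (PySem.Str.upper text))
  cases hcs : (PySem.Str.upper text).toList with
  | nil => simp
  | cons c0 rest =>
      rw [hcs] at hmem
      simp only [if_neg (List.cons_ne_nil c0 rest)]
      obtain ⟨hlt, hflat⟩ := core (c0 :: rest) hmem
      rw [hflat]
      have hfold := dcval_eq (c0 :: rest).length (c0 :: rest) rfl (List.cons_ne_nil c0 rest) hmem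
      rw [hfold]
      have hlenstr : PySem.Str.len (PySem.Str.upper text) = ((c0 :: rest).length : ℤ) := by
        unfold PySem.Str.len; rw [hcs]
      rw [hlenstr]
      have := zfill_toBin (c0 :: rest).length (List.foldl natstep 0 (c0 :: rest))
        (by simp) hlt
      rw [show (5 : ℤ) * ((c0 :: rest).length : ℤ) = 5 * (((c0 :: rest).length : ℕ) : ℤ) by ring] at this ⊢
      rw [this]
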